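-- pv_equiv track=rewrite | github.com/Vivekyadv/InterviewBit | Heaps and Maps/Heap/5. magician and chocolates.py | solve
-- ===== SOURCE A (Python) =====
-- def solve(arr, t):
--     mod = 10**9 + 7
--     result = 0
--
--     while t > 0:
--         max_ele = max(arr)
--         indx = arr.index(max_ele)
--         result += max_ele
--
--         arr[indx] = arr[indx] // 2
--         t -= 1
--
--     return result%mod
-- ===== SOURCE B (Python) =====
-- def solve(arr, t):
--     mod = 10**9 + 7
--     result = 0
--     s = sorted(arr, reverse=True)
--     while t > 0:
--         h = s[0]
--         half = h // 2
--         if half == h: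
--             # the maximum is a halving fixed point (0 or -1): every remaining
--             # step adds the same value, so finish in closed form
--             result += h * t
--             t = 0
--         else:
--             result += h
--             t -= 1
--             tail = s[1:]
--             i = 0
--             while i < len(tail) and tail[i] > half:
--                 i += 1
--             s = tail[:i] + [half] + tail[i:]
--     return result % mod
-- ===== Notes on version B (the rewrite author's own statement) =====
-- stated objective: alternative
-- what changed: B sorts the list once and keeps it in descending order, re-inserting the halved maximum in place of A's per-step linear max+index scans, and terminates in closed form (h*t) as soon as the maximum reaches a halving fixed point (0 or -1); B does not mutate the argument list, A does.
import Mathlib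
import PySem

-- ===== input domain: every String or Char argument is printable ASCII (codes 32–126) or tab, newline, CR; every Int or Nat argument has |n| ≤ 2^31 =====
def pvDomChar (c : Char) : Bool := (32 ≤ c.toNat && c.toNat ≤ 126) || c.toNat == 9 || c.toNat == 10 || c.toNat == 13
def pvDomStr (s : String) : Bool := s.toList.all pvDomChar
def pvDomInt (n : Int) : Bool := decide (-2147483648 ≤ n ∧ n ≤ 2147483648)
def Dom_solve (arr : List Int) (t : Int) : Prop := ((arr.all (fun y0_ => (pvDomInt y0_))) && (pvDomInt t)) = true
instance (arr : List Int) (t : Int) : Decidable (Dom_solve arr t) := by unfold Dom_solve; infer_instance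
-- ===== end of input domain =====

-- B keeps a descending sorted list (sort once, re-insert the halved maximum in place) and finishes
-- in closed form once the maximum is a halving fixed point, instead of A's linear max-scan per step.
-- A mutates its argument list in place (halves elements); B does not — the equivalence proved here is
-- about the RETURN value only.

-- ===== PORT A =====
-- while t > 0: max_ele = max(arr); indx = arr.index(max_ele); result += max_ele; arr[indx] //= 2; t -= 1
def solveLoopA : List Int → Nat → Int → Int
  | _, 0, result => result
  | arr, k+1, result =>
    match PySem.List.max? arr (fun y => y) with
    | none => result        -- Python: max([]) raises ValueError (excluded by Pre_solve)
    | some max_ele =>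
      match PySem.List.index? arr max_ele with
      | none => result      -- unreachable: max_ele ∈ arr
      | some indx =>
        solveLoopA (arr.set indx (PySem.Int.floordiv (arr.getD indx 0) 2)) k (result + max_ele)

def solve (arr : List Int) (t : Int) : Int :=
  PySem.Int.mod (solveLoopA arr t.toNat 0) (10^9 + 7)

-- ===== PORT B =====
-- insertion into a descending list: skip while head > v, then place v (Source B's inner while loop)
def insDesc (v : Int) : List Int → List Int
  | [] => [v]
  | x :: xs => if x > v then x :: insDesc v xs else v :: x :: xs

def solveLoopB : List Int → Nat → Int → Int
  | _, 0, result => result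
  | s, k+1, result =>
    match PySem.List.pyGet? s 0 with
    | none => result        -- Python: s[0] raises IndexError (excluded by Pre_solve)
    | some h =>
      let half := PySem.Int.floordiv h 2
      if half = h then result + h * ((k : Int) + 1)
      else solveLoopB (insDesc half (PySem.List.slice s (some 1) none)) k (result + h)

def solve_alt (arr : List Int) (t : Int) : Int :=
  PySem.Int.mod (solveLoopB (PySem.List.sorted arr (fun y => y) true) t.toNat 0) (10^9 + 7)

-- ===== PRECONDITION & SPEC =====
-- Pre_ excludes only the inputs where Python A raises: arr = [] with t > 0 (max([]) is a ValueError).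
def Pre_solve (arr : List Int) (t : Int) : Prop := arr ≠ [] ∨ t ≤ 0
instance (arr : List Int) (t : Int) : Decidable (Pre_solve arr t) := by unfold Pre_solve; infer_instance
def pvWitness_solve : List Int × Int := ([5, 3, 8], 4)

def Spec_solve (arr : List Int) (t : Int) (out : Int) : Prop := out = solve_alt arr t
instance (arr : List Int) (t : Int) (out : Int) : Decidable (Spec_solve arr t out) := by unfold Spec_solve; infer_instance

-- ===== CLAIM (what is proved, stated in full; the proofs are below) =====
def Claim_equal_solve : Prop := ∀ (arr : List Int) (t : Int), Dom_solve arr t → Pre_solve arr t → Spec_solve arr t (solve arr t)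

-- ===== LEMMAS AND PROOFS =====

lemma insDesc_eq_orderedInsert (v : Int) (l : List Int) :
    insDesc v l = List.orderedInsert (· ≥ ·) v l := by
  induction l with
  | nil => rfl
  | cons x xs ih =>
    by_cases h : x > v
    · simp [insDesc, List.orderedInsert, ih, h, not_le.mpr h]
    · simp [insDesc, List.orderedInsert, h, not_lt.mp h]

lemma set_append_cons (pre suf : List Int) (m v : Int) :
    (pre ++ m :: suf).set pre.length v = pre ++ v :: suf := by
  induction pre with
  | nil => rfl
  | cons a tl ih => simp [ih]

-- once the maximum is a halving fixed point, A's list never changes and each step adds the maximum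
lemma loopA_fix (k : Nat) (arr : List Int) (res m : Int)
    (hmax : PySem.List.max? arr (fun y => y) = some m)
    (hfix : PySem.Int.floordiv m 2 = m) :
    solveLoopA arr k res = res + m * k := by
  induction k generalizing res with
  | zero => simp [solveLoopA]
  | succ k ih =>
    have hmem : m ∈ arr := PySem.List.max?_mem hmax
    obtain ⟨idx, hidx⟩ := Option.isSome_iff_exists.mp ((PySem.List.index?_isSome_iff arr m).mpr hmem)
    obtain ⟨hlt, hget, -⟩ := PySem.List.getElem_of_index?_eq_some hidx
    have hgetD : arr.getD idx 0 = m := by rw [List.getD_eq_getElem _ _ hlt, hget]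
    have hset : arr.set idx (PySem.Int.floordiv (arr.getD idx 0) 2) = arr := by
      rw [hgetD, hfix, ← hget]; exact List.set_getElem_self ..
    rw [solveLoopA, hmax]
    simp only [hidx]
    rw [hset, ih]
    push_cast; ring

-- the core simulation: A's list is a permutation of B's descending sorted list
lemma loopA_eq_loopB (k : Nat) (arr s : List Int) (res : Int)
    (hperm : arr.Perm s) (hsort : s.Pairwise (· ≥ ·)) :
    solveLoopA arr k res = solveLoopB s k res := by
  induction k generalizing arr s res with
  | zero => rfl
  | succ k ih =>
    cases s with
    | nil =>
      have : arr = [] := hperm.eq_nil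
      subst this
      simp [solveLoopA, solveLoopB, PySem.List.max?, PySem.List.pyGet?]
    | cons h tl =>
      have harr : arr ≠ [] := by
        intro h0; subst h0; have := hperm.length_eq; simp at this
      obtain ⟨m, hmax⟩ := Option.isSome_iff_exists.mp
        (show (PySem.List.max? arr (fun y => y)).isSome from by
          rw [Option.isSome_iff_ne_none]; intro hn
          exact harr ((PySem.List.max?_eq_none_iff arr _).mp hn))
      -- the head of the sorted list is exactly max(arr)
      have hmemm : m ∈ arr := PySem.List.max?_mem hmax
      have hm_le_h : m ≤ h := by
        rcases List.mem_cons.mp (hperm.mem_iff.mp hmemm) with h1 | h1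
        · exact le_of_eq h1
        · exact List.rel_of_pairwise_cons hsort h1
      have hh_le_m : h ≤ m := PySem.List.max?_isMax hmax h (hperm.mem_iff.mpr (by simp))
      have hmh : m = h := le_antisymm hm_le_h hh_le_m
      subst hmh
      obtain ⟨idx, hidx⟩ := Option.isSome_iff_exists.mp ((PySem.List.index?_isSome_iff arr m).mpr hmemm)
      obtain ⟨pre, suf, hdec, hlen, -⟩ := (PySem.List.index?_eq_some_iff arr m idx).mp hidx
      have hlt : idx < arr.length := by rw [hdec, ← hlen]; simp
      have hgetD : arr.getD idx 0 = m := by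
        rw [List.getD_eq_getElem _ _ hlt]
        obtain ⟨hb, hg, -⟩ := PySem.List.getElem_of_index?_eq_some hidx
        exact hg
      rw [solveLoopB, PySem.List.pyGet?_zero_cons]
      by_cases hfix : PySem.Int.floordiv m 2 = m
      · simp only [hfix]
        rw [loopA_fix (k+1) arr res m hmax hfix]
        push_cast; ring
      · simp only [if_neg hfix]
        rw [solveLoopA, hmax]
        simp only [hidx]
        rw [hgetD]
        set half := PySem.Int.floordiv m 2 with hhalf
        have hsetA : arr.set idx half = pre ++ half :: suf := by
          rw [hdec, ← hlen]; exact set_append_cons ..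
        have hperm' : (arr.set idx half).Perm (insDesc half tl) := by
          rw [hsetA, insDesc_eq_orderedInsert]
          refine List.Perm.trans ?_ (List.perm_orderedInsert _ _ _).symm
          refine List.Perm.trans List.perm_middle (List.Perm.cons _ ?_)
          have h1 : arr.Perm (m :: (pre ++ suf)) := by rw [hdec]; exact List.perm_middle
          exact (h1.symm.trans hperm).cons_inv
        have hsort' : (insDesc half tl).Pairwise (· ≥ ·) := by
          rw [insDesc_eq_orderedInsert]
          exact List.Pairwise.orderedInsert _ _ (List.Pairwise.of_cons hsort)
        have := ih (arr.set idx half) (insDesc half tl) (res + m) hperm' hsort'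
        have hsl : PySem.List.slice (m :: tl) (some 1) none = tl := by
          simp [PySem.List.slice]
        rw [hsl]
        exact this

-- ===== VERDICT (by name: the statement is the Claim_ definition above) =====
theorem solve_spec : Claim_equal_solve := by
  intro arr t _dom _pre
  show solve arr t = solve_alt arr t
  unfold solve solve_alt
  congr 1
  exact loopA_eq_loopB t.toNat arr (PySem.List.sorted arr (fun y => y) true) 0
    (PySem.List.sorted_perm ..).symm (PySem.List.sorted_pairwise_rev ..)
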